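-- pv_equiv track=rewrite | github.com/Rahil-Soroush/spire-neurips2025-copy1 | src/data/synth_data.py | _auto_bipolar_pairs
-- ===== SOURCE A (Python) =====
-- from typing import Dict, Tuple, List, Optional, Any
--
-- def _auto_bipolar_pairs(contacts_per_row: List[int]) -> List[Tuple[int,int]]:
--     """
--     Simple neighbor bipolars within each row (1-2, 2-3, ...). Cross-row pairs are not made automatically.
--     """
--     pairs = []
--     base = 1
--     for n in contacts_per_row:
--         for j in range(n-1):
--             pairs.append((base+j, base+j+1))
--         base += n
--     return pairs
-- ===== SOURCE B (Python) =====
-- from typing import List, Tuple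
--
-- def _auto_bipolar_pairs(contacts_per_row: List[int]) -> List[Tuple[int, int]]:
--     """Boundary-set formulation: collect the cumulative row-end indices into a
--     set, then one linear pass over 1..total-1 emits (i, i+1) unless i is a
--     row boundary."""
--     ends = set()
--     total = 0
--     for n in contacts_per_row:
--         total += n
--         ends.add(total)
--     return [(i, i + 1) for i in range(1, total) if i not in ends]
-- ===== Notes on version B (the rewrite author's own statement) =====
-- stated objective: alternative
-- what changed: Replaces A's nested per-row pair loops with a boundary-set algorithm: one pass collects the cumulative row-end indices into a set, then a single flat pass over range(1, total) emits (i, i+1) for every i that is not a row boundary.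
-- outside the precondition, e.g. on _auto_bipolar_pairs([3, -2]): A returns [(1, 2), (2, 3)], B returns []
import Mathlib
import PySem

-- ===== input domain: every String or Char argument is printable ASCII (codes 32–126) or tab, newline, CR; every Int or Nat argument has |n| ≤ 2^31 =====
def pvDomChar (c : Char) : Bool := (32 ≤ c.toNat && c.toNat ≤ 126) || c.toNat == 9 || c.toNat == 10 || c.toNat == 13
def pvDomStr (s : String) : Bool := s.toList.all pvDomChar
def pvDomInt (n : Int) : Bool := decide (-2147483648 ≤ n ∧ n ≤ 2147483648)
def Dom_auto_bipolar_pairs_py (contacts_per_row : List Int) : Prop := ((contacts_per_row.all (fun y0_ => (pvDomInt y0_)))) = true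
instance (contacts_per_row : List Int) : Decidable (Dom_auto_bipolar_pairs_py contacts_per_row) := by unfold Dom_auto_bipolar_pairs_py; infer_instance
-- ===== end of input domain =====

-- B replaces A's nested per-row loops by a boundary-set algorithm: collect cumulative row-end indices into a set, then one flat pass over 1..total-1 emits (i, i+1) unless i is a boundary (alternative algorithm, same cost).

-- ===== PORT A =====
def auto_bipolar_pairs_py (contacts_per_row : List Int) : List (Int × Int) :=
  (contacts_per_row.foldl
    (fun (st : List (Int × Int) × Int) n =>
      ((PySem.List.pyRange 0 (n - 1) 1).foldl
         (fun ps j => ps ++ [(st.2 + j, st.2 + j + 1)]) st.1,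
       st.2 + n))
    ([], 1)).1

-- ===== PORT B =====
def auto_bipolar_pairs_py_alt (contacts_per_row : List Int) : List (Int × Int) :=
  let st := contacts_per_row.foldl
    (fun (st : PySem.Set Int × Int) n =>
      let t := st.2 + n
      (PySem.Set.add st.1 t, t))
    ((PySem.Set.empty : PySem.Set Int), 0)
  ((PySem.List.pyRange 1 st.2 1).filter
      (fun i => !(PySem.Set.contains st.1 i))).map (fun i => (i, i + 1))

-- ===== PRECONDITION & SPEC =====
-- Pre_ excludes lists containing a negative entry: a negative contact count is outside the
-- natural domain of the function (a count of contacts per electrode row); on such inputs A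
-- still returns a value (its running base decreases, shifting later rows backwards), which
-- B's boundary-set pass does not reproduce.
def Pre_auto_bipolar_pairs_py (contacts_per_row : List Int) : Prop :=
  ∀ n ∈ contacts_per_row, 0 ≤ n
instance (contacts_per_row : List Int) : Decidable (Pre_auto_bipolar_pairs_py contacts_per_row) := by unfold Pre_auto_bipolar_pairs_py; infer_instance
def pvWitness_auto_bipolar_pairs_py : List Int := [2, 0, 3]

def Spec_auto_bipolar_pairs_py (contacts_per_row : List Int) (out : List (Int × Int)) : Prop := out = auto_bipolar_pairs_py_alt contacts_per_row
instance (contacts_per_row : List Int) (out : List (Int × Int)) : Decidable (Spec_auto_bipolar_pairs_py contacts_per_row out) := by unfold Spec_auto_bipolar_pairs_py; infer_instance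

-- ===== CLAIM (what is proved, stated in full; the proofs are below) =====
def Claim_equal_auto_bipolar_pairs_py : Prop := ∀ (contacts_per_row : List Int), Dom_auto_bipolar_pairs_py contacts_per_row → Pre_auto_bipolar_pairs_py contacts_per_row → Spec_auto_bipolar_pairs_py contacts_per_row (auto_bipolar_pairs_py contacts_per_row)

-- ===== LEMMAS AND PROOFS =====

-- proof-side reference: the per-row pairs from a given base, by structural recursion
def rowsSpec (base : Int) : List Int → List (Int × Int)
  | [] => []
  | n :: rest =>
      (PySem.List.pyRange 0 (n - 1) 1).map (fun j => (base + j, base + j + 1))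
      ++ rowsSpec (base + n) rest

-- proof-side reference: the cumulative row-end indices from a running total t
def cumsSpec (t : Int) : List Int → List Int
  | [] => []
  | n :: rest => (t + n) :: cumsSpec (t + n) rest

-- A's inner loop appends one pair per j: it is acc ++ map.
theorem foldl_append_map {α β : Type} (f : α → β) (l : List α) (acc : List β) :
    l.foldl (fun ps j => ps ++ [f j]) acc = acc ++ l.map f := by
  induction l generalizing acc with
  | nil => simp
  | cons x xs ih => simp [List.foldl, ih]

-- Invariant of A's outer fold: accumulated pairs = acc ++ the per-row pairs from this base.
theorem foldA_eq_rows (cpr : List Int) (acc : List (Int × Int)) (base : Int) :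
    (cpr.foldl
      (fun (st : List (Int × Int) × Int) n =>
        ((PySem.List.pyRange 0 (n - 1) 1).foldl
           (fun ps j => ps ++ [(st.2 + j, st.2 + j + 1)]) st.1,
         st.2 + n))
      (acc, base)).1 = acc ++ rowsSpec base cpr := by
  induction cpr generalizing acc base with
  | nil => simp [rowsSpec]
  | cons n rest ih =>
      simp only [List.foldl, rowsSpec]
      rw [ih, foldl_append_map, List.append_assoc]

-- Invariant of B's first loop: the set of boundaries and the running total.
theorem foldB_eq_cums (cpr : List Int) (s : PySem.Set Int) (t : Int) :
    cpr.foldl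
      (fun (st : PySem.Set Int × Int) n =>
        ((PySem.Set.add st.1 (st.2 + n), st.2 + n)))
      (s, t) = ((cumsSpec t cpr).foldl PySem.Set.add s, t + cpr.sum) := by
  induction cpr generalizing s t with
  | nil => simp [cumsSpec]
  | cons n rest ih =>
      simp only [List.foldl, cumsSpec, List.sum_cons, ih]
      have h : t + n + rest.sum = t + (n + rest.sum) := by ring
      rw [h]

-- membership in a set built by repeated add
theorem mem_foldl_add (l : List Int) (s : PySem.Set Int) (x : Int) :
    x ∈ l.foldl PySem.Set.add s ↔ x ∈ s ∨ x ∈ l := by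
  induction l generalizing s with
  | nil => simp
  | cons y ys ih =>
      simp [List.foldl, ih, PySem.Set.mem_add]
      tauto

-- boundaries running from total t stay ≥ t when all rows are nonnegative
theorem cumsSpec_lower (l : List Int) (t : Int) (hnn : ∀ n ∈ l, 0 ≤ n) :
    ∀ x ∈ cumsSpec t l, t ≤ x := by
  induction l generalizing t with
  | nil => simp [cumsSpec]
  | cons n rest ih =>
      intro x hx
      have hn : 0 ≤ n := hnn n (by simp)
      simp only [cumsSpec, List.mem_cons] at hx
      rcases hx with rfl | hx
      · omega
      · have := ih (t + n) (fun m hm => hnn m (by simp [hm])) x hx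
        omega

theorem sum_nonneg_of_mem (l : List Int) (hnn : ∀ n ∈ l, 0 ≤ n) : 0 ≤ l.sum := by
  induction l with
  | nil => simp
  | cons n rest ih =>
      have := hnn n (by simp)
      have := ih (fun m hm => hnn m (by simp [hm]))
      simp only [List.sum_cons]
      omega

-- merging a cons into the "already below" list does not change the filter predicate
theorem pred_shift (pre : List Int) (c : Int) (cs : List Int) :
    (fun i : Int => !(pre.contains i || (c :: cs).contains i))
      = (fun i : Int => !((pre ++ [c]).contains i || cs.contains i)) := by
  funext i
  apply congrArg Bool.not
  rw [Bool.eq_iff_iff]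
  simp only [Bool.or_eq_true, List.contains_iff_mem, List.mem_cons, List.mem_append]
  tauto

-- dropping the (filtered-out) left endpoint of a range
theorem filter_drop_head (P : Int → Bool) (a b : Int) (hP : P a = false) :
    (PySem.List.pyRange a b 1).filter P = (PySem.List.pyRange (a + 1) b 1).filter P := by
  by_cases hab : a < b
  · rw [PySem.List.pyRange_one_cons hab]
    simp [List.filter, hP]
  · rw [PySem.List.pyRange_one_eq_nil (by omega), PySem.List.pyRange_one_eq_nil (by omega)]

-- the core correspondence: the filtered flat range equals the per-row pairs
theorem filtered_range_eq_rows (l : List Int) (t : Int) (pre : List Int)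
    (hnn : ∀ n ∈ l, 0 ≤ n) (hpre : ∀ x ∈ pre, x ≤ t) :
    ((PySem.List.pyRange (t + 1) (t + l.sum) 1).filter
        (fun i => !(pre.contains i || (cumsSpec t l).contains i))).map
      (fun i => (i, i + 1))
    = rowsSpec (t + 1) l := by
  induction l generalizing t pre with
  | nil =>
      rw [List.sum_nil, PySem.List.pyRange_one_eq_nil (by omega)]
      simp [rowsSpec]
  | cons n rest ih =>
      have hn : 0 ≤ n := hnn n (by simp)
      have hrest : ∀ m ∈ rest, 0 ≤ m := fun m hm => hnn m (by simp [hm])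
      have hS : 0 ≤ rest.sum := sum_nonneg_of_mem rest hrest
      have hpre' : ∀ x ∈ pre ++ [t + n], x ≤ t + n := by
        intro x hx
        rcases List.mem_append.mp hx with hx | hx
        · have := hpre x hx; omega
        · simp at hx; omega
      by_cases hn0 : n = 0
      · subst hn0
        simp only [rowsSpec, cumsSpec, List.sum_cons]
        rw [pred_shift]
        rw [PySem.List.pyRange_one_eq_nil (show (0:Int) - 1 ≤ 0 by omega)]
        simp only [List.map_nil, List.nil_append]
        have h2 : t + (0 + rest.sum) = (t + 0) + rest.sum := by ring
        have h3 : t + 1 = (t + 0) + 1 := by ring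
        have h4 : t + 1 + 0 = (t + 0) + 1 := by ring
        rw [h2, h4, h3]
        exact ih ((t : Int) + 0) (pre ++ [t + 0]) hrest hpre'
      · have hn1 : 1 ≤ n := by omega
        rw [List.sum_cons,
          PySem.List.pyRange_one_append (t + 1) (t + n) (t + (n + rest.sum))
            (by omega) (by omega),
          List.filter_append, List.map_append]
        simp only [rowsSpec, cumsSpec]
        have htail : ∀ x ∈ cumsSpec (t + n) rest, t + n ≤ x :=
          cumsSpec_lower rest (t + n) hrest
        congr 1
        · -- first block: nothing is filtered out
          have hkeep : ∀ i ∈ PySem.List.pyRange (t + 1) (t + n) 1,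
              (!(pre.contains i || ((t + n) :: cumsSpec (t + n) rest).contains i)) = true := by
            intro i hi
            rw [PySem.List.mem_pyRange_one] at hi
            have h1 : i ∉ pre := fun h => by have := hpre i h; omega
            have h2 : i ∉ (t + n) :: cumsSpec (t + n) rest := by
              intro h
              rcases List.mem_cons.mp h with rfl | h
              · omega
              · have := htail i h; omega
            simp [h1, h2]
          rw [List.filter_eq_self.mpr hkeep,
            PySem.List.pyRange_one, PySem.List.pyRange_one, List.map_map, List.map_map]
          have h5 : t + n - (t + 1) = n - 1 - 0 := by ring
          rw [h5]
          apply List.map_congr_left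
          intro k _
          simp only [Function.comp_apply, Prod.mk.injEq]
          constructor <;> ring
        · -- second block: drop the boundary t+n, shift pre, apply the IH
          have hd : (fun i : Int => !(pre.contains i || ((t + n) :: cumsSpec (t + n) rest).contains i)) (t + n) = false := by
            simp
          rw [filter_drop_head _ _ _ hd, pred_shift]
          have h2 : t + (n + rest.sum) = (t + n) + rest.sum := by ring
          have h6 : t + 1 + n = t + n + 1 := by ring
          rw [h2, h6]
          exact ih (t + n) (pre ++ [t + n]) hrest hpre'

-- the t = 0 corollary in the shape the port produces
theorem filtered_range_zero (l : List Int) (hnn : ∀ n ∈ l, 0 ≤ n) :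
    ((PySem.List.pyRange 1 l.sum 1).filter
        (fun i => !((cumsSpec 0 l).contains i))).map (fun i => (i, i + 1))
    = rowsSpec 1 l := by
  have h := filtered_range_eq_rows l 0 [] hnn (by simp)
  have hp : (fun i : Int => !(([] : List Int).contains i || (cumsSpec 0 l).contains i))
      = (fun i : Int => !((cumsSpec 0 l).contains i)) := by
    funext i
    simp
  rw [hp] at h
  have e1 : (0 : Int) + 1 = 1 := by ring
  have e2 : (0 : Int) + l.sum = l.sum := by ring
  rw [e1, e2] at h
  exact h

-- ===== VERDICT (by name: the statement is the Claim_ definition above) =====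
theorem auto_bipolar_pairs_py_spec : Claim_equal_auto_bipolar_pairs_py := by
  intro cpr _ hpre
  unfold Spec_auto_bipolar_pairs_py auto_bipolar_pairs_py auto_bipolar_pairs_py_alt
  rw [foldA_eq_rows]
  simp only [foldB_eq_cums]
  have hcont : (fun i : Int =>
      !(PySem.Set.contains ((cumsSpec 0 cpr).foldl PySem.Set.add PySem.Set.empty) i))
      = (fun i : Int => !((cumsSpec 0 cpr).contains i)) := by
    funext i
    apply congrArg Bool.not
    rw [Bool.eq_iff_iff]
    have hc : PySem.Set.contains ((cumsSpec 0 cpr).foldl PySem.Set.add PySem.Set.empty) i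
        = List.contains ((cumsSpec 0 cpr).foldl PySem.Set.add PySem.Set.empty) i := rfl
    rw [hc]
    simp only [List.contains_iff_mem, mem_foldl_add]
    simp [PySem.Set.empty]
  rw [hcont]
  have e2 : (0 : Int) + cpr.sum = cpr.sum := by ring
  rw [e2]
  rw [filtered_range_zero cpr hpre]
  simp
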